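-- pv_equiv track=rewrite | github.com/CarolynOlsen/sec_filing_comparison_agent | src/filing_agent/utils/filing_parser.py | summarize_section
-- ===== SOURCE A (Python) =====
-- def summarize_section(section_content: str, max_length: int = 2000) -> str:
--     """Summarize a section to fit within token limits."""
--
--     if len(section_content) <= max_length:
--         return section_content
--
--     # Split into paragraphs
--     paragraphs = section_content.split('\n\n')
--
--     # Keep the first few paragraphs and add a summary note
--     summary_parts = []
--     current_length = 0
--
--     for paragraph in paragraphs:
--         if current_length + len(paragraph) > max_length - 200:
--             break
--         summary_parts.append(paragraph)
--         current_length += len(paragraph)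
--
--     summary = '\n\n'.join(summary_parts)
--     summary += f"\n\n[Note: This is a summary of the first {len(summary_parts)} paragraphs. Full section is {len(section_content):,} characters.]"
--
--     return summary
-- ===== SOURCE B (Python) =====
-- def summarize_section(section_content: str, max_length: int = 2000) -> str:
--     """Summarize a section to fit within token limits."""
--
--     if len(section_content) <= max_length:
--         return section_content
--
--     paragraphs = section_content.split('\n\n')
--     budget = max_length - 200
--
--     # Prefix sums of paragraph lengths; since lengths are non-negative the
--     # sums are non-decreasing, so the greedy cutoff is just the number of
--     # prefix sums that fit within the budget.
--     sums = []
--     total = 0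
--     for p in paragraphs:
--         total += len(p)
--         sums.append(total)
--     count = sum(1 for s in sums if s <= budget)
--
--     summary = '\n\n'.join(paragraphs[:count])
--     return summary + (
--         f"\n\n[Note: This is a summary of the first {count} paragraphs. "
--         f"Full section is {len(section_content):,} characters.]"
--     )
-- ===== Notes on version B (the rewrite author's own statement) =====
-- stated objective: alternative
-- what changed: Replaces the greedy accumulate-and-break loop with a prefix-sum pipeline: build the list of running paragraph-length sums, take the cutoff as the count of sums within the budget (valid since the sums are non-decreasing), then slice and join the paragraphs.
import Mathlib
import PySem

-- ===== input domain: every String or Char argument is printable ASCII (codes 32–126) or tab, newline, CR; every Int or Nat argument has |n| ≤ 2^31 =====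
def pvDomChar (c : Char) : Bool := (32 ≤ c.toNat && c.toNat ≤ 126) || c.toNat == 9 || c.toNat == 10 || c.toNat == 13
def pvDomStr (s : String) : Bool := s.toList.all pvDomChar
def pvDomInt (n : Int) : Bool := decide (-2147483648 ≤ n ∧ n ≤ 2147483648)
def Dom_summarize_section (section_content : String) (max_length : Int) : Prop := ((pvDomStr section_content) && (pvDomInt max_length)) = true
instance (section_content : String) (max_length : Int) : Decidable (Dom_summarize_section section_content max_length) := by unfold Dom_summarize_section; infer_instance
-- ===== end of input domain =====

-- B replaces A's greedy break-loop by prefix sums + a count of sums within budget, then slice and join (alternative decomposition, same cost).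

-- Shared by both ports: Python's f-string pieces.
-- f"{n:,}" (comma-grouped decimal); exact for n ≥ 0, the only values it receives here (a string length).
def commaGroup (l : List Char) : List Char :=
  if l.length ≤ 3 then l else l.take 3 ++ ',' :: commaGroup (l.drop 3)
termination_by l.length
decreasing_by simp; omega

def commaFmt (n : Int) : List Char := (commaGroup (PySem.Int.toChars n).reverse).reverse

-- the note appended by the f-string, identical in both Pythons
def noteChars (k : Nat) (n : Int) : List Char :=
  "\n\n[Note: This is a summary of the first ".toList ++ PySem.Int.toChars (k : Int)
    ++ " paragraphs. Full section is ".toList ++ commaFmt n ++ " characters.]".toList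

-- ===== PORT A =====
-- the for-loop with break, carrying summary_parts and current_length
def aLoop (ps : List (List Char)) (parts : List (List Char)) (cur : Int) (max_length : Int) :
    List (List Char) :=
  match ps with
  | [] => parts
  | p :: rest =>
      if cur + PySem.Chars.len p > max_length - 200 then parts
      else aLoop rest (parts ++ [p]) (cur + PySem.Chars.len p) max_length

def summarize_section (section_content : String) (max_length : Int) : String :=
  if PySem.Str.len section_content ≤ max_length then section_content
  else
    let paragraphs := PySem.Chars.splitOn section_content.toList "\n\n".toList
    let parts := aLoop paragraphs [] 0 max_length
    let summary := PySem.Chars.join "\n\n".toList parts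
    String.ofList (summary ++ noteChars parts.length (PySem.Str.len section_content))

-- ===== PORT B =====
-- Source B's prefix-sum loop: fold carrying (total, sums)
def bSums (ps : List (List Char)) : List Int :=
  (ps.foldl (fun (st : Int × List Int) p =>
      (st.1 + PySem.Chars.len p, st.2 ++ [st.1 + PySem.Chars.len p])) ((0 : Int), [])).2

def summarize_section_alt (section_content : String) (max_length : Int) : String :=
  if PySem.Str.len section_content ≤ max_length then section_content
  else
    let paragraphs := PySem.Chars.splitOn section_content.toList "\n\n".toList
    let budget := max_length - 200
    let sums := bSums paragraphs
    let count := sums.countP (fun s => s ≤ budget)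
    let summary := PySem.Chars.join "\n\n".toList (paragraphs.take count)
    String.ofList (summary ++ noteChars count (PySem.Str.len section_content))

-- ===== PRECONDITION & SPEC =====
def Spec_summarize_section (section_content : String) (max_length : Int) (out : String) : Prop := out = summarize_section_alt section_content max_length
instance (section_content : String) (max_length : Int) (out : String) : Decidable (Spec_summarize_section section_content max_length out) := by unfold Spec_summarize_section; infer_instance

-- ===== CLAIM (what is proved, stated in full; the proofs are below) =====
def Claim_equal_summarize_section : Prop := ∀ (section_content : String) (max_length : Int), Dom_summarize_section section_content max_length → Spec_summarize_section section_content max_length (summarize_section section_content max_length)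

-- ===== LEMMAS AND PROOFS =====

-- prefix sums starting from cur, recursively
def sumsFrom (ps : List (List Char)) (cur : Int) : List Int :=
  match ps with
  | [] => []
  | p :: rest => (cur + PySem.Chars.len p) :: sumsFrom rest (cur + PySem.Chars.len p)

lemma bSums_fold (ps : List (List Char)) (cur : Int) (acc : List Int) :
    (ps.foldl (fun (st : Int × List Int) p =>
      (st.1 + PySem.Chars.len p, st.2 ++ [st.1 + PySem.Chars.len p])) (cur, acc)).2
      = acc ++ sumsFrom ps cur := by
  induction ps generalizing cur acc with
  | nil => simp [sumsFrom]
  | cons p rest ih => rw [List.foldl_cons, ih]; simp [sumsFrom]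

lemma bSums_eq (ps : List (List Char)) : bSums ps = sumsFrom ps 0 := by
  simpa using bSums_fold ps 0 []

lemma sumsFrom_le (ps : List (List Char)) (cur : Int) :
    ∀ x ∈ sumsFrom ps cur, cur ≤ x := by
  induction ps generalizing cur with
  | nil => simp [sumsFrom]
  | cons p rest ih =>
      intro x hx
      have hlen : (0 : Int) ≤ PySem.Chars.len p := by
        simp [PySem.Chars.len_eq]
      simp only [sumsFrom, List.mem_cons] at hx
      rcases hx with h | h
      · omega
      · have := ih (cur + PySem.Chars.len p) x h; omega

lemma sumsFrom_length (ps : List (List Char)) (cur : Int) :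
    (sumsFrom ps cur).length = ps.length := by
  induction ps generalizing cur with
  | nil => rfl
  | cons p rest ih => simp [sumsFrom, ih]

lemma aLoop_eq (ps : List (List Char)) (parts : List (List Char)) (cur max_length : Int) :
    aLoop ps parts cur max_length
      = parts ++ ps.take ((sumsFrom ps cur).countP (fun s => decide (s ≤ max_length - 200))) := by
  induction ps generalizing parts cur with
  | nil => simp [aLoop, sumsFrom]
  | cons p rest ih =>
      by_cases h : cur + PySem.Chars.len p > max_length - 200
      · have hcnt : (sumsFrom (p :: rest) cur).countP (fun s => decide (s ≤ max_length - 200)) = 0 := by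
          rw [List.countP_eq_zero]
          intro x hx
          simp only [sumsFrom, List.mem_cons] at hx
          rcases hx with rfl | hx
          · simpa using h
          · have := sumsFrom_le rest (cur + PySem.Chars.len p) x hx
            simp; omega
        rw [hcnt]
        simp only [List.take_zero, List.append_nil, aLoop]
        rw [if_pos h]
      · push Not at h
        have hcnt : (sumsFrom (p :: rest) cur).countP (fun s => decide (s ≤ max_length - 200))
            = (sumsFrom rest (cur + PySem.Chars.len p)).countP (fun s => decide (s ≤ max_length - 200)) + 1 := by
          have h' : cur + (p.length : Int) ≤ max_length - 200 := by
            simpa [PySem.Chars.len_eq] using h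
          simp [sumsFrom, h']
        rw [hcnt]
        simp only [aLoop, if_neg (by omega : ¬ cur + PySem.Chars.len p > max_length - 200)]
        rw [ih]
        simp [List.take_succ_cons]

lemma countP_le_len (ps : List (List Char)) (cur b : Int) :
    (sumsFrom ps cur).countP (fun s => decide (s ≤ b)) ≤ ps.length := by
  calc (sumsFrom ps cur).countP (fun s => decide (s ≤ b)) ≤ (sumsFrom ps cur).length :=
        List.countP_le_length
    _ = ps.length := sumsFrom_length ps cur

-- ===== VERDICT (by name: the statement is the Claim_ definition above) =====
theorem summarize_section_spec : Claim_equal_summarize_section := by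
  intro section_content max_length _
  unfold Spec_summarize_section summarize_section summarize_section_alt
  simp only [PySem.Str.len_eq]
  by_cases h : ((section_content.toList.length : Int) ≤ max_length)
  · rw [if_pos h, if_pos h]
  · simp only [if_neg h]
    set ps := PySem.Chars.splitOn section_content.toList "\n\n".toList with hps
    rw [bSums_eq, aLoop_eq]
    have hle := countP_le_len ps 0 (max_length - 200)
    rw [List.nil_append, List.length_take, Nat.min_eq_left hle]
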